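-- pv_equiv track=rewrite | github.com/NickRuiz/lattice-align | dump-src-target-fst.py | segmentation2list
-- ===== SOURCE A (Python) =====
-- def segmentation2list(line):
--     '''turn ambiguous segmentation to list of possible segmentation paths'''
--     tokens = line.split(' ')
--     linears = ['']
--     for token in tokens:
--         segmentations = token.split('|')
--         path_count = len(linears)
--         # the number of new paths is ambiguity*
--         linears = linears * len(segmentations)
--         for segment_index in range(len(segmentations)):
--             # add new segments to each of paths
--             for i in range(path_count):
--                 linears[i + segment_index * path_count] +=  ' ' + segmentations[segment_index].replace('>', ' ').replace('+', ' ')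
--     return [x.strip() for x in linears]
-- ===== SOURCE B (Python) =====
-- def segmentation2list(line):
--     '''turn ambiguous segmentation to list of possible segmentation paths'''
--     seg_lists = [[s.replace('>', ' ').replace('+', ' ') for s in token.split('|')]
--                  for token in line.split(' ')]
--     combos = [[]]
--     for segs in reversed(seg_lists):
--         combos = [[seg] + tail for tail in combos for seg in segs]
--     return [' '.join(combo).strip() for combo in combos]
-- ===== Notes on version B (the rewrite author's own statement) =====
-- stated objective: idiomatic
-- what changed: A grows a flat path list by list replication and in-place index-arithmetic mutation (linears[i + segment_index*path_count] += ...); B precomputes the cleaned alternatives per token, builds the combination lists with a right-to-left cartesian-product fold, and joins each combination once at the end.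
import Mathlib
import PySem

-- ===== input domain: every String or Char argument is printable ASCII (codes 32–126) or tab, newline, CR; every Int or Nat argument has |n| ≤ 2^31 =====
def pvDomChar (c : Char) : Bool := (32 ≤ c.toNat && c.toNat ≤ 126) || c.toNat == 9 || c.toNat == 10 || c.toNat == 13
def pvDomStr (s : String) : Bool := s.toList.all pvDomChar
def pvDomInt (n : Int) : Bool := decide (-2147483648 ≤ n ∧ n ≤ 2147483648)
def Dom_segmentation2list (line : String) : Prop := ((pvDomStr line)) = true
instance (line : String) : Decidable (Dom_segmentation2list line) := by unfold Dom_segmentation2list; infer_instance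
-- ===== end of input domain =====

-- B replaces A's in-place index arithmetic over a replicated path list by building the
-- combination lists with a right-to-left cartesian-product fold and joining each at the end
-- (objective: alternative/idiomatic; same output, same order).

-- ===== PORT A =====
-- one token's processing step: replicate the path list and extend each block in place
-- (strings are carried as List Char; the PySem.Str.* wrappers are thin over these PySem.Chars.* functions, so this is exact)
def pvStepA (linears : List (List Char)) (token : List Char) : List (List Char) :=
  let segmentations := PySem.Chars.splitOn token ['|']
  let path_count := linears.length
  let linears' := (List.replicate segmentations.length linears).flatten
  (List.range segmentations.length).foldl (fun lin segment_index =>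
    (List.range path_count).foldl (fun lin i =>
      lin.set (i + segment_index * path_count)
        ((lin.getD (i + segment_index * path_count) []) ++
          ([' '] ++ PySem.Chars.replace (PySem.Chars.replace (segmentations.getD segment_index []) ['>'] [' ']) ['+'] [' '])))
      lin) linears'

def segmentation2list (line : String) : List String :=
  let tokens := PySem.Chars.splitOn line.toList [' ']
  ((tokens.foldl pvStepA [[]]).map (fun x => String.ofList (PySem.Chars.strip x)))

-- ===== PORT B =====
def segmentation2list_alt (line : String) : List String :=
  let seg_lists := (PySem.Chars.splitOn line.toList [' ']).map
    (fun token => (PySem.Chars.splitOn token ['|']).map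
      (fun s => PySem.Chars.replace (PySem.Chars.replace s ['>'] [' ']) ['+'] [' ']))
  let combos := seg_lists.reverse.foldl
    (fun combos segs => combos.flatMap (fun tail => segs.map (fun seg => seg :: tail))) [[]]
  combos.map (fun combo => String.ofList (PySem.Chars.strip (PySem.Chars.join [' '] combo)))

-- ===== PRECONDITION & SPEC =====
def Spec_segmentation2list (line : String) (out : List String) : Prop := out = segmentation2list_alt line
instance (line : String) (out : List String) : Decidable (Spec_segmentation2list line out) := by unfold Spec_segmentation2list; infer_instance

-- ===== CLAIM (what is proved, stated in full; the proofs are below) =====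
def Claim_equal_segmentation2list : Prop := ∀ (line : String), Dom_segmentation2list line → Spec_segmentation2list line (segmentation2list line)

-- ===== LEMMAS AND PROOFS =====

-- the cleaned segmentation alternatives of one token
def pvSegsC (token : List Char) : List (List Char) :=
  (PySem.Chars.splitOn token ['|']).map
    (fun s => PySem.Chars.replace (PySem.Chars.replace s ['>'] [' ']) ['+'] [' '])

-- the string A accumulates for one combination: a leading space before every segment
def pvJoinSp : List (List Char) → List Char
  | [] => []
  | s :: rest => ([' '] ++ s) ++ pvJoinSp rest

-- the combination lists (first token varying fastest)
def pvCmb : List (List (List Char)) → List (List (List Char))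
  | [] => [[]]
  | segs :: rest => (pvCmb rest).flatMap (fun tail => segs.map (fun seg => seg :: tail))

-- A's inner loop appends `a` to every element of one contiguous block
theorem pvInner (a : List Char) : ∀ (mid pre post : List (List Char)),
    (List.range mid.length).foldl
      (fun l i => l.set (i + pre.length) ((l.getD (i + pre.length) []) ++ a))
      (pre ++ (mid ++ post))
    = pre ++ (mid.map (· ++ a) ++ post) := by
  intro mid
  induction mid with
  | nil => intro pre post; simp
  | cons m mid' ih =>
    intro pre post
    rw [List.length_cons, List.range_succ_eq_map]
    simp only [List.foldl_cons, List.foldl_map]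
    have h0 : ((pre ++ (m :: mid' ++ post)).set (0 + pre.length)
        (((pre ++ (m :: mid' ++ post)).getD (0 + pre.length) []) ++ a))
        = (pre ++ [m ++ a]) ++ (mid' ++ post) := by
      simp
    rw [h0]
    have hb : ∀ (l : List (List Char)) (i : Nat),
        l.set (Nat.succ i + pre.length) ((l.getD (Nat.succ i + pre.length) []) ++ a)
        = l.set (i + (pre ++ [m ++ a]).length) ((l.getD (i + (pre ++ [m ++ a]).length) []) ++ a) := by
      intro l i
      have : Nat.succ i + pre.length = i + (pre ++ [m ++ a]).length := by simp; omega
      rw [this]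
    simp only [hb]
    rw [ih (pre ++ [m ++ a]) post]
    simp

-- A's double loop over the replicated list is a flatMap over the segment alternatives
theorem pvOuter (lin : List (List Char)) (F : List Char → List Char) :
    ∀ (ss : List (List Char)) (k : Nat) (pre : List (List Char)),
    pre.length = k * lin.length →
    (List.range ss.length).foldl
      (fun l si => (List.range lin.length).foldl
        (fun l i => l.set (i + (si + k) * lin.length)
          ((l.getD (i + (si + k) * lin.length) []) ++ F (ss.getD si [])))
        l)
      (pre ++ (List.replicate ss.length lin).flatten)
    = pre ++ ss.flatMap (fun s => lin.map (· ++ F s)) := by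
  intro ss
  induction ss with
  | nil => intro k pre h; simp
  | cons s ss' ih =>
    intro k pre h
    rw [List.length_cons, List.range_succ_eq_map]
    simp only [List.foldl_cons, List.foldl_map]
    have h0 : (List.range lin.length).foldl
        (fun l i => l.set (i + (0 + k) * lin.length)
          ((l.getD (i + (0 + k) * lin.length) []) ++ F ((s :: ss').getD 0 [])))
        (pre ++ (List.replicate (ss'.length + 1) lin).flatten)
        = (pre ++ lin.map (· ++ F s)) ++ (List.replicate ss'.length lin).flatten := by
      have := pvInner (F s) lin pre ((List.replicate ss'.length lin).flatten)
      simp only [Nat.zero_add, ← h, List.getD_cons_zero, List.replicate_succ,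
        List.flatten_cons] at this ⊢
      rw [this]
      simp
    rw [h0]
    have hlen : (pre ++ lin.map (· ++ F s)).length = (k + 1) * lin.length := by
      simp [h]; ring
    have hb : ∀ (l : List (List Char)) (si : Nat),
        (List.range lin.length).foldl
          (fun l i => l.set (i + (Nat.succ si + k) * lin.length)
            ((l.getD (i + (Nat.succ si + k) * lin.length) []) ++ F ((s :: ss').getD (Nat.succ si) [])))
          l
        = (List.range lin.length).foldl
          (fun l i => l.set (i + (si + (k + 1)) * lin.length)
            ((l.getD (i + (si + (k + 1)) * lin.length) []) ++ F (ss'.getD si [])))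
          l := by
      intro l si
      have h1 : Nat.succ si + k = si + (k + 1) := by omega
      rw [h1, List.getD_cons_succ]
    simp only [hb]
    rw [ih (k + 1) (pre ++ lin.map (· ++ F s)) hlen]
    simp

theorem pvStepA_eq (lin : List (List Char)) (token : List Char) :
    pvStepA lin token = (pvSegsC token).flatMap (fun s => lin.map (· ++ ([' '] ++ s))) := by
  unfold pvStepA
  have := pvOuter lin (fun s => [' '] ++ PySem.Chars.replace (PySem.Chars.replace s ['>'] [' ']) ['+'] [' '])
    (PySem.Chars.splitOn token ['|']) 0 []
  simp only [Nat.add_zero, Nat.zero_mul, List.nil_append, List.length_nil] at this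
  simp only []
  rw [this trivial]
  simp [pvSegsC, List.flatMap_map]

theorem pvFoldA_eq : ∀ (ts : List (List Char)) (lin : List (List Char)),
    ts.foldl pvStepA lin
    = (pvCmb (ts.map pvSegsC)).flatMap (fun c => lin.map (· ++ pvJoinSp c)) := by
  intro ts
  induction ts with
  | nil => intro lin; simp [pvCmb, pvJoinSp]
  | cons t ts ih =>
    intro lin
    rw [List.foldl_cons, ih (pvStepA lin t), pvStepA_eq]
    simp [pvCmb, pvJoinSp, List.map_flatMap, List.flatMap_map, List.map_map, Function.comp_def,
      List.flatMap_assoc, List.append_assoc]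

theorem pvFoldB_eq (L : List (List (List Char))) :
    L.reverse.foldl
      (fun combos segs => combos.flatMap (fun tail => segs.map (fun seg => seg :: tail))) [[]]
    = pvCmb L := by
  rw [List.foldl_reverse]
  induction L with
  | nil => simp [pvCmb]
  | cons segs L ih => simp [pvCmb, ih]

theorem pvJoinSp_cons : ∀ (r : List (List Char)) (s : List Char),
    pvJoinSp (s :: r) = ' ' :: PySem.Chars.join [' '] (s :: r) := by
  intro r
  induction r with
  | nil => intro s; simp [pvJoinSp, PySem.Chars.join_singleton]
  | cons t r ih =>
    intro s
    rw [PySem.Chars.join_cons_cons]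
    simp [pvJoinSp] at ih ⊢
    exact ih t

theorem pvStripSp (x : List Char) : PySem.Chars.strip (' ' :: x) = PySem.Chars.strip x := by
  simp [PySem.Chars.strip, PySem.Chars.lstrip, PySem.Chars.rstrip, PySem.Chars.isspace]

theorem pvJoinSp_eq (c : List (List Char)) :
    PySem.Chars.strip (pvJoinSp c) = PySem.Chars.strip (PySem.Chars.join [' '] c) := by
  cases c with
  | nil => simp [pvJoinSp, PySem.Chars.join_nil]
  | cons s r => rw [pvJoinSp_cons, pvStripSp]

-- ===== VERDICT (by name: the statement is the Claim_ definition above) =====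
theorem segmentation2list_spec : Claim_equal_segmentation2list := by
  intro line _
  unfold Spec_segmentation2list segmentation2list segmentation2list_alt
  simp only [pvFoldA_eq, pvFoldB_eq]
  simp only [List.map_cons, List.map_nil, List.nil_append]
  have hm : List.flatMap (fun c => [pvJoinSp c])
      (pvCmb (List.map pvSegsC (PySem.Chars.splitOn line.toList [' '])))
      = (pvCmb (List.map pvSegsC (PySem.Chars.splitOn line.toList [' ']))).map pvJoinSp :=
    Eq.symm List.map_eq_flatMap
  rw [hm, List.map_map]
  simp [Function.comp_def, pvJoinSp_eq]
  rfl
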